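-- pv_equiv track=rewrite | github.com/hgarrereyn/manim-clips | examples/frameshift/frameshift.py | byte_color_for_offset
-- ===== SOURCE A (Python) =====
-- SIG_COLOR = "#FCD34D"   # signature — gold
--
-- SIZE_COLOR = "#F97316"  # chunk size fields — orange
--
-- TYPE_COLOR = "#22D3EE"  # chunk type fields — cyan
--
-- DATA_COLOR = "#94A3B8"  # chunk data — slate
--
-- CRC_COLOR = "#475569"   # CRC — dim (usually disabled for fuzzing)
--
-- chunks_list = [
--     ("IHDR", 13), ("gAMA", 4), ("sRGB", 1), ("cHRM", 32),
--     ("bKGD", 2), ("pHYs", 9), ("IDAT", 947),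
--     ("tEXt", 37), ("tEXt", 37), ("tEXt", 7), ("tEXt", 19),
--     ("IEND", 0),
-- ]
--
-- def byte_color_for_offset(offset):
--     """Color a PNG byte by its role (signature / size / type / data / crc)."""
--     if offset < 8:
--         return SIG_COLOR
--     cur = 8
--     for _name, size in chunks_list:
--         if cur <= offset < cur + 4:
--             return SIZE_COLOR
--         if cur + 4 <= offset < cur + 8:
--             return TYPE_COLOR
--         if cur + 8 <= offset < cur + 8 + size:
--             return DATA_COLOR
--         if cur + 8 + size <= offset < cur + 12 + size:
--             return CRC_COLOR
--         cur += 12 + size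
--     return DATA_COLOR
-- ===== SOURCE B (Python) =====
-- SIG_COLOR = "#FCD34D"
-- SIZE_COLOR = "#F97316"
-- TYPE_COLOR = "#22D3EE"
-- DATA_COLOR = "#94A3B8"
-- CRC_COLOR = "#475569"
--
-- chunks_list = [
--     ("IHDR", 13), ("gAMA", 4), ("sRGB", 1), ("cHRM", 32),
--     ("bKGD", 2), ("pHYs", 9), ("IDAT", 947),
--     ("tEXt", 37), ("tEXt", 37), ("tEXt", 7), ("tEXt", 19),
--     ("IEND", 0),
-- ]
--
-- # Precomputed index table: (start offset, data size) of every chunk, plus total file length.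
-- _STARTS = []
-- _cur = 8
-- for _name, _size in chunks_list:
--     _STARTS.append((_cur, _size))
--     _cur += 12 + _size
-- _TOTAL = _cur
--
-- def byte_color_for_offset(offset):
--     """Color a PNG byte by its role (signature / size / type / data / crc)."""
--     if offset < 8:
--         return SIG_COLOR
--     if offset >= _TOTAL:
--         return DATA_COLOR
--     # binary search: greatest chunk index whose start <= offset
--     lo, hi = 0, len(_STARTS) - 1
--     while lo < hi:
--         mid = lo + (hi - lo + 1) // 2
--         if _STARTS[mid][0] <= offset:
--             lo = mid
--         else:
--             hi = mid - 1
--     start, size = _STARTS[lo]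
--     rel = offset - start
--     if rel < 4:
--         return SIZE_COLOR
--     if rel < 8:
--         return TYPE_COLOR
--     if rel < 8 + size:
--         return DATA_COLOR
--     return CRC_COLOR
-- ===== Notes on version B (the rewrite author's own statement) =====
-- stated objective: alternative
-- what changed: B precomputes a table of chunk start offsets once at module load and locates the chunk with a binary search plus a relative-offset classification, instead of A's per-call linear scan that re-accumulates the running offset over the chunk list.
import Mathlib
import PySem

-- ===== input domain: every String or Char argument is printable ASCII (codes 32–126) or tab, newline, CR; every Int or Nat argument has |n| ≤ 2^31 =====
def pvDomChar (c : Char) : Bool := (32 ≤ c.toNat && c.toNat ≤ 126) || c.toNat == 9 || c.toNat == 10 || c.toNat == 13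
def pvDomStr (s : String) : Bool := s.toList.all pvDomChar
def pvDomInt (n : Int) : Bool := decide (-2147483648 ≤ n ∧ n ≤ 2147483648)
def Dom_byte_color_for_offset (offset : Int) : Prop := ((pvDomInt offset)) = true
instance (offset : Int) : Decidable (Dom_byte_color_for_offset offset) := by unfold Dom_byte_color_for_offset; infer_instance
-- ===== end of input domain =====

-- B replaces A's linear scan over the chunk list by a precomputed start-offset
-- table plus a hand-written binary search (objective: alternative data structure).

def SIG_COLOR : String := "#FCD34D"
def SIZE_COLOR : String := "#F97316"
def TYPE_COLOR : String := "#22D3EE"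
def DATA_COLOR : String := "#94A3B8"
def CRC_COLOR : String := "#475569"

def chunks_list : List (String × Int) :=
  [("IHDR", 13), ("gAMA", 4), ("sRGB", 1), ("cHRM", 32),
   ("bKGD", 2), ("pHYs", 9), ("IDAT", 947),
   ("tEXt", 37), ("tEXt", 37), ("tEXt", 7), ("tEXt", 19),
   ("IEND", 0)]

-- ===== PORT A =====
-- the for-loop of A with its early returns, recursion over the chunk list carrying `cur`
def aLoop (offset : Int) : List (String × Int) → Int → String
  | [], _ => DATA_COLOR
  | (_, size) :: rest, cur =>
    if cur ≤ offset ∧ offset < cur + 4 then SIZE_COLOR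
    else if cur + 4 ≤ offset ∧ offset < cur + 8 then TYPE_COLOR
    else if cur + 8 ≤ offset ∧ offset < cur + 8 + size then DATA_COLOR
    else if cur + 8 + size ≤ offset ∧ offset < cur + 12 + size then CRC_COLOR
    else aLoop offset rest (cur + 12 + size)

def byte_color_for_offset (offset : Int) : String :=
  if offset < 8 then SIG_COLOR
  else aLoop offset chunks_list 8

-- ===== PORT B =====
-- module-level table build of Source B: (start, size) for every chunk and the total length
def startsLoop : List (String × Int) → Int → List (Int × Int) × Int
  | [], cur => ([], cur)
  | (_, size) :: rest, cur =>
    let r := startsLoop rest (cur + 12 + size)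
    ((cur, size) :: r.1, r.2)

def pvSTARTS : List (Int × Int) := (startsLoop chunks_list 8).1
def pvTOTAL : Int := (startsLoop chunks_list 8).2

-- Source B's while-loop binary search, with a fuel argument (the list length bounds the
-- number of iterations, so the fuel never runs out); indexing is in range, ported with getD
def bfind (offset : Int) : Nat → Nat → Nat → Nat
  | 0, lo, _ => lo
  | fuel + 1, lo, hi =>
    if lo < hi then
      let mid := lo + (hi - lo + 1) / 2
      if (pvSTARTS.getD mid (0, 0)).1 ≤ offset then bfind offset fuel mid hi
      else bfind offset fuel lo (mid - 1)
    else lo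

def byte_color_for_offset_alt (offset : Int) : String :=
  if offset < 8 then SIG_COLOR
  else if offset ≥ pvTOTAL then DATA_COLOR
  else
    let lo := bfind offset pvSTARTS.length 0 (pvSTARTS.length - 1)
    let p := pvSTARTS.getD lo (0, 0)
    let rel := offset - p.1
    if rel < 4 then SIZE_COLOR
    else if rel < 8 then TYPE_COLOR
    else if rel < 8 + p.2 then DATA_COLOR
    else CRC_COLOR

-- ===== PRECONDITION & SPEC =====
def Spec_byte_color_for_offset (offset : Int) (out : String) : Prop := out = byte_color_for_offset_alt offset
instance (offset : Int) (out : String) : Decidable (Spec_byte_color_for_offset offset out) := by unfold Spec_byte_color_for_offset; infer_instance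

-- ===== CLAIM (what is proved, stated in full; the proofs are below) =====
def Claim_equal_byte_color_for_offset : Prop := ∀ (offset : Int), Dom_byte_color_for_offset offset → Spec_byte_color_for_offset offset (byte_color_for_offset offset)

-- ===== LEMMAS AND PROOFS =====

set_option maxRecDepth 20000 in
set_option maxHeartbeats 2000000 in
-- in the in-file range, check all 1260 offsets by evaluation
theorem agree_small : ∀ k : Nat, k < 1260 → byte_color_for_offset (k : Int) = byte_color_for_offset_alt (k : Int) := by
  decide

-- beyond the last CRC both sides fall through to DATA_COLOR
-- sum of 12 + size over a chunk list
def sumLen (l : List (String × Int)) : Int := l.foldr (fun p a => 12 + p.2 + a) 0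

theorem sumLen_nonneg : ∀ l : List (String × Int), (∀ p ∈ l, 0 ≤ p.2) → 0 ≤ sumLen l
  | [], _ => le_refl 0
  | p :: rest, h => by
    have h0 := h p (List.mem_cons_self ..)
    have hr := sumLen_nonneg rest (fun q hq => h q (List.mem_cons_of_mem _ hq))
    simp only [sumLen, List.foldr] at *
    omega

-- A's loop falls through to DATA_COLOR once offset is past all chunks
theorem aLoop_big (offset : Int) : ∀ (l : List (String × Int)) (cur : Int),
    (∀ p ∈ l, 0 ≤ p.2) → cur + sumLen l ≤ offset → aLoop offset l cur = DATA_COLOR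
  | [], _, _, _ => rfl
  | (n, size) :: rest, cur, hpos, hle => by
    have h0 : (0 : Int) ≤ size := hpos (n, size) (List.mem_cons_self ..)
    have hr := sumLen_nonneg rest (fun q hq => hpos q (List.mem_cons_of_mem _ hq))
    have hs : sumLen ((n, size) :: rest) = 12 + size + sumLen rest := rfl
    rw [hs] at hle
    rw [aLoop, if_neg (by omega), if_neg (by omega), if_neg (by omega), if_neg (by omega)]
    exact aLoop_big offset rest (cur + 12 + size)
      (fun q hq => hpos q (List.mem_cons_of_mem _ hq)) (by omega)

-- beyond the last CRC both sides fall through to DATA_COLOR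
theorem agree_big (offset : Int) (h : 1260 ≤ offset) :
    byte_color_for_offset offset = byte_color_for_offset_alt offset := by
  unfold byte_color_for_offset byte_color_for_offset_alt
  have ht : pvTOTAL = 1260 := by decide
  rw [if_neg (by omega), if_neg (by omega), if_pos (by rw [ge_iff_le, ht]; omega)]
  exact aLoop_big offset chunks_list 8 (by decide) (by
    have : sumLen chunks_list = 1252 := by decide
    omega)

-- ===== VERDICT (by name: the statement is the Claim_ definition above) =====
theorem byte_color_for_offset_spec : Claim_equal_byte_color_for_offset := by
  intro offset _
  unfold Spec_byte_color_for_offset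
  by_cases h : offset < 1260
  · by_cases h8 : offset < 0
    · unfold byte_color_for_offset byte_color_for_offset_alt
      rw [if_pos (by omega), if_pos (by omega)]
    · have hk : offset = ((offset.toNat : Nat) : Int) := by omega
      rw [hk]
      exact agree_small offset.toNat (by omega)
  · exact agree_big offset (by omega)
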